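-- pv_equiv track=rewrite | github.com/gabo1208/projects | python/test2.py | dp
-- ===== SOURCE A (Python) =====
-- def dp(arr):
--     mod = (10**9) + 7
--     even, odd = 0, 0
--     res = 0
--     for i in range(len(arr)):
--         if arr[i] % 2 == 0:
--             res += odd
--             even += 1
--
--         if arr[i] % 2 != 0:
--             res += even + 1
--             odd += 1
--     return res
-- ===== SOURCE B (Python) =====
-- def dp(arr):
--     odd = sum(1 for x in arr if x % 2 != 0)
--     even = len(arr) - odd
--     return even * odd + odd
-- ===== Notes on version B (the rewrite author's own statement) =====
-- stated objective: simpler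
-- what changed: Replaces the running even/odd/res accumulator loop with a single parity count and the closed form even*odd + odd (cross-parity pairs plus the odd singletons).
import Mathlib
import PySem

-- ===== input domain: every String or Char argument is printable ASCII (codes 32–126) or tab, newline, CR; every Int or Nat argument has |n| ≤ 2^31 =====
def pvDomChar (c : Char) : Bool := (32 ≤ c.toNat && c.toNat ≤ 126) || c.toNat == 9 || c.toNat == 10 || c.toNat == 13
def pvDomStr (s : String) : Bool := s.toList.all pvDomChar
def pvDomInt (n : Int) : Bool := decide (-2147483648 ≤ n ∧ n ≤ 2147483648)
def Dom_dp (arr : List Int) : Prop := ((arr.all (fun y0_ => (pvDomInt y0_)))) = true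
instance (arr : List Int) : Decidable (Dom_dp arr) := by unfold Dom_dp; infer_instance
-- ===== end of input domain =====

-- B replaces A's running even/odd/res accumulator loop by one parity count and the
-- closed form even*odd + odd (objective: simpler).

-- ===== PORT A =====
-- literal port of A: loop over range(len(arr)), indexing arr[i]; state (even, odd, res)
def dp (arr : List Int) : Int :=
  let _mod : Int := 10 ^ 9 + 7
  let s := (PySem.List.pyRange 0 (arr.length : Int) 1).foldl
    (fun (s : Int × Int × Int) i =>
      let x := PySem.List.pyGetD arr i 0
      let s := if PySem.Int.mod x 2 = 0 then (s.1 + 1, s.2.1, s.2.2 + s.2.1) else s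
      let s := if PySem.Int.mod x 2 ≠ 0 then (s.1, s.2.1 + 1, s.2.2 + s.1 + 1) else s
      s)
    (0, 0, 0)
  s.2.2

-- ===== PORT B =====
def dp_alt (arr : List Int) : Int :=
  let odd : Int := arr.countP (fun x => PySem.Int.mod x 2 ≠ 0)
  let even : Int := (arr.length : Int) - odd
  even * odd + odd

-- ===== PRECONDITION & SPEC =====
def Spec_dp (arr : List Int) (out : Int) : Prop := out = dp_alt arr
instance (arr : List Int) (out : Int) : Decidable (Spec_dp arr out) := by unfold Spec_dp; infer_instance

-- ===== CLAIM (what is proved, stated in full; the proofs are below) =====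
def Claim_equal_dp : Prop := ∀ (arr : List Int), Dom_dp arr → Spec_dp arr (dp arr)

-- ===== LEMMAS AND PROOFS =====

-- the loop body of A's port, expressed on the element value
def dpStep (s : Int × Int × Int) (x : Int) : Int × Int × Int :=
  let s := if PySem.Int.mod x 2 = 0 then (s.1 + 1, s.2.1, s.2.2 + s.2.1) else s
  let s := if PySem.Int.mod x 2 ≠ 0 then (s.1, s.2.1 + 1, s.2.2 + s.1 + 1) else s
  s

lemma dpStep_even (e o r x : Int) (h : PySem.Int.mod x 2 = 0) :
    dpStep (e, o, r) x = (e + 1, o, r + o) := by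
  simp only [dpStep, h]
  norm_num

lemma dpStep_odd (e o r x : Int) (h : ¬ PySem.Int.mod x 2 = 0) :
    dpStep (e, o, r) x = (e, o + 1, r + e + 1) := by
  simp only [dpStep, if_neg h, if_pos h]

-- counts of odd / even elements, as Int
def oddCnt (l : List Int) : Int := l.countP (fun x => PySem.Int.mod x 2 ≠ 0)
def evenCnt (l : List Int) : Int := l.countP (fun x => PySem.Int.mod x 2 = 0)

lemma oddCnt_cons (x : Int) (l : List Int) :
    oddCnt (x :: l) = oddCnt l + (if PySem.Int.mod x 2 = 0 then 0 else 1) := by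
  by_cases h : PySem.Int.mod x 2 = 0
  · rw [if_pos h]
    simp only [oddCnt, List.countP_cons, decide_eq_false (not_not_intro h)]
    push_cast; ring
  · rw [if_neg h]
    simp only [oddCnt, List.countP_cons, decide_eq_true h]
    push_cast; ring

lemma evenCnt_cons (x : Int) (l : List Int) :
    evenCnt (x :: l) = evenCnt l + (if PySem.Int.mod x 2 = 0 then 1 else 0) := by
  by_cases h : PySem.Int.mod x 2 = 0
  · rw [if_pos h]
    simp only [evenCnt, List.countP_cons, decide_eq_true h]
    push_cast; ring
  · rw [if_neg h]
    simp only [evenCnt, List.countP_cons, decide_eq_false h]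
    push_cast; ring

lemma dp_loop_invariant (l : List Int) : ∀ (e o r : Int),
    l.foldl dpStep (e, o, r) =
      (e + evenCnt l, o + oddCnt l,
       r + o * evenCnt l + e * oddCnt l + evenCnt l * oddCnt l + oddCnt l) := by
  induction l with
  | nil => intro e o r; simp [oddCnt, evenCnt]
  | cons x l ih =>
    intro e o r
    rw [List.foldl_cons, evenCnt_cons, oddCnt_cons]
    by_cases h : PySem.Int.mod x 2 = 0
    · rw [if_pos h, if_pos h, dpStep_even e o r x h, ih]
      refine Prod.ext ?_ (Prod.ext ?_ ?_) <;> simp <;> ring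
    · rw [if_neg h, if_neg h, dpStep_odd e o r x h, ih]
      refine Prod.ext ?_ (Prod.ext ?_ ?_) <;> simp <;> ring

lemma countP_length_split (l : List Int) : evenCnt l = (l.length : Int) - oddCnt l := by
  induction l with
  | nil => simp [evenCnt, oddCnt]
  | cons x l ih =>
    rw [evenCnt_cons, oddCnt_cons, ih]
    by_cases h : PySem.Int.mod x 2 = 0
    · rw [if_pos h, if_pos h]; simp only [List.length_cons]; push_cast; ring
    · rw [if_neg h, if_neg h]; simp only [List.length_cons]; push_cast; ring

-- ===== VERDICT (by name: the statement is the Claim_ definition above) =====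
theorem dp_spec : Claim_equal_dp := by
  intro arr _
  show dp arr = dp_alt arr
  have h : dp arr = (arr.foldl dpStep ((0:Int), (0:Int), (0:Int))).2.2 := by
    show ((PySem.List.pyRange 0 (arr.length : Int) 1).foldl
        (fun acc j => dpStep acc (PySem.List.pyGetD arr j (0:Int)))
        ((0:Int), (0:Int), (0:Int))).2.2 = _
    rw [PySem.List.foldl_pyRange_zero_pyGetD' arr (0:Int) dpStep ((0:Int), (0:Int), (0:Int))]
  rw [h, dp_loop_invariant]
  rw [countP_length_split]
  simp only [dp_alt, oddCnt]
  ring
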